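-- pv_equiv track=rewrite | github.com/qeedquan/challenges | codegolf/display-sentence-in-alphabetical-order.py | alphabetical
-- ===== SOURCE A (Python) =====
-- def alphabetical(s):
--     m = {}
--     for c in s:
--         if c not in m:
--             m[c] = 0
--         m[c] += 1
--
--     r = ""
--     for i in range(26):
--         c0 = chr(ord('a') + i)
--         c1 = chr(ord('A') + i)
--         l0 = 0
--         l1 = 0
--         if c0 in m:
--             l0 = m[c0]
--         if c1 in m:
--             l1 = m[c1]
--         r += c0*l0 + c1*l1
--     return r
-- ===== SOURCE B (Python) =====
-- def alphabetical(s):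
--     kept = [c for c in s if 'a' <= c <= 'z' or 'A' <= c <= 'Z']
--     return ''.join(sorted(kept, key=lambda c: 2 * ord(c.lower()) + c.isupper()))
-- ===== Notes on version B (the rewrite author's own statement) =====
-- stated objective: simpler
-- what changed: Replaces A's count-dictionary plus 26-iteration bucket-emission loop with a single comparison sort: filter the ASCII letters and sort them by the key 2*ord(c.lower()) + c.isupper(), which orders alphabetically with lowercase before uppercase.
import Mathlib
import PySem

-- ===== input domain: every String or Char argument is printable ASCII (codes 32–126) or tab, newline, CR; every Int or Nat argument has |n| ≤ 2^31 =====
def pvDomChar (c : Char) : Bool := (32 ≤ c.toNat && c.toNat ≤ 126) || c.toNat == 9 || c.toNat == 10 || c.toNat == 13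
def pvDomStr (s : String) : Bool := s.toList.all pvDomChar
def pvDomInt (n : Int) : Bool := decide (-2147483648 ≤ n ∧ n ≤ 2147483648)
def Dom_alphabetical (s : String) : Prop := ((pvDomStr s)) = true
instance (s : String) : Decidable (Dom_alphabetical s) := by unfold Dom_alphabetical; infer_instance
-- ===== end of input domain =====

-- B replaces A's count-dict plus 26-bucket emission loop by one comparison sort of the
-- kept ASCII letters under the key 2*ord(c.lower()) + c.isupper(); objective: simpler.

-- ===== PORT A =====
def alphabetical (s : String) : String :=
  -- m = {}; for c in s: if c not in m: m[c] = 0; m[c] += 1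
  let m : PySem.Dict Char Int := s.toList.foldl (fun m c =>
    let m := if m.contains c = false then m.insert c 0 else m
    m.insert c (m.getD c 0 + 1)) PySem.Dict.empty
  -- r = ""; for i in range(26): … ; r += c0*l0 + c1*l1
  let r : List Char := (PySem.List.pyRange 0 26).foldl (fun r i =>
    let c0 := Char.ofNat (('a'.toNat : Int) + i).toNat
    let c1 := Char.ofNat (('A'.toNat : Int) + i).toNat
    let l0 : Int := if m.contains c0 then m.getD c0 0 else 0
    let l1 : Int := if m.contains c1 then m.getD c1 0 else 0
    r ++ (PySem.List.pyRepeat [c0] l0 ++ PySem.List.pyRepeat [c1] l1)) []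
  String.ofList r

-- ===== PORT B =====
-- key(c) = 2*ord(c.lower()) + c.isupper(); Source B applies it only to ASCII letters, where
-- c.lower() adds 32 to an uppercase code and c.isupper() tests 'A'..'Z'
def pvKeyB (c : Char) : Int :=
  2 * (if 'A' ≤ c ∧ c ≤ 'Z' then (c.toNat : Int) + 32 else (c.toNat : Int)) +
  (if 'A' ≤ c ∧ c ≤ 'Z' then 1 else 0)

def alphabetical_alt (s : String) : String :=
  let kept := s.toList.filter (fun c =>
    (decide ('a' ≤ c) && decide (c ≤ 'z')) || (decide ('A' ≤ c) && decide (c ≤ 'Z')))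
  String.ofList (PySem.List.sorted kept pvKeyB)

-- ===== PRECONDITION & SPEC =====
def Spec_alphabetical (s : String) (out : String) : Prop := out = alphabetical_alt s
instance (s : String) (out : String) : Decidable (Spec_alphabetical s out) := by unfold Spec_alphabetical; infer_instance

-- ===== CLAIM (what is proved, stated in full; the proofs are below) =====
def Claim_equal_alphabetical : Prop := ∀ (s : String), Dom_alphabetical s → Spec_alphabetical s (alphabetical s)

-- ===== LEMMAS AND PROOFS =====

-- the filter predicate of B, named
def pvLetterB (c : Char) : Bool :=
  (decide ('a' ≤ c) && decide (c ≤ 'z')) || (decide ('A' ≤ c) && decide (c ≤ 'Z'))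

def pvLc (i : Nat) : Char := Char.ofNat (97 + i)
def pvUc (i : Nat) : Char := Char.ofNat (65 + i)

-- the common canonical result: for each letter, its lowercase then uppercase occurrences
def pvCanon (f : Char → Nat) (n : Nat) : List Char :=
  (List.range n).flatMap (fun i =>
    List.replicate (f (pvLc i)) (pvLc i) ++ List.replicate (f (pvUc i)) (pvUc i))

theorem pvLc_toNat (i : Nat) (h : i < 26) : (pvLc i).toNat = 97 + i := by
  interval_cases i <;> decide

theorem pvUc_toNat (i : Nat) (h : i < 26) : (pvUc i).toNat = 65 + i := by
  interval_cases i <;> decide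

theorem pv_toNat_inj {a b : Char} (h : a.toNat = b.toNat) : a = b := by
  apply Char.ext; exact UInt32.toNat_inj.mp h

theorem pvLc_ne_pvUc {i j : Nat} (hi : i < 26) (hj : j < 26) : pvLc i ≠ pvUc j := by
  intro h
  have := congrArg Char.toNat h
  rw [pvLc_toNat i hi, pvUc_toNat j hj] at this; omega

-- A's counting loop is Counter(s)
theorem pv_m_eq_counter (xs : List Char) :
    xs.foldl (fun m c =>
      let m := if m.contains c = false then m.insert c 0 else m
      m.insert c (m.getD c 0 + 1)) PySem.Dict.empty = PySem.Dict.counter xs := by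
  have hstep : (fun (m : PySem.Dict Char Int) c =>
      let m := if m.contains c = false then m.insert c 0 else m
      m.insert c (m.getD c 0 + 1)) = fun m c => m.insert c (m.getD c 0 + 1) := by
    funext m c
    by_cases h : m.contains c = false
    · simp only [h, if_true]
      rw [PySem.Dict.getD_insert_self, PySem.Dict.insert_insert_self,
          PySem.Dict.getD_of_not_contains m 0 h]
    · simp [h]
  rw [hstep, PySem.Dict.foldl_insert_getD_add_one_eq_counter]

theorem pv_cnt (xs : List Char) (c : Char) :
    (if (PySem.Dict.counter xs).contains c then (PySem.Dict.counter xs).getD c 0 else 0).toNat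
      = xs.count c := by
  rw [PySem.Dict.contains_counter, PySem.Dict.getD_counter]
  by_cases h : c ∈ xs
  · simp [h]
  · simp [h, List.count_eq_zero.mpr h]

theorem pv_c0 (i : Nat) :
    Char.ofNat (('a'.toNat : Int) + (i:Int)).toNat = pvLc i := by
  have : (('a'.toNat : Int) + (i:Int)).toNat = 97 + i := by push_cast; omega
  rw [this]; rfl

theorem pv_c1 (i : Nat) :
    Char.ofNat (('A'.toNat : Int) + (i:Int)).toNat = pvUc i := by
  have : (('A'.toNat : Int) + (i:Int)).toNat = 65 + i := by push_cast; omega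
  rw [this]; rfl

-- A's output is the canonical list with counts taken in the whole string
theorem pv_A_canon (s : String) :
    (alphabetical s).toList = pvCanon (fun c => s.toList.count c) 26 := by
  simp only [alphabetical]
  rw [pv_m_eq_counter]
  rw [show (26:Int) = ((26:Nat):Int) by norm_num, PySem.List.pyRange_zero_natCast]
  rw [List.foldl_map, PySem.List.foldl_append_eq_flatMap]
  rw [String.toList_ofList, List.nil_append]
  apply List.flatMap_congr
  intro i _
  rw [pv_c0, pv_c1, PySem.List.pyRepeat_singleton, PySem.List.pyRepeat_singleton,
      pv_cnt, pv_cnt]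

theorem pvCanon_succ (f : Char → Nat) (n : Nat) :
    pvCanon f (n + 1) = pvCanon f n ++
      (List.replicate (f (pvLc n)) (pvLc n) ++ List.replicate (f (pvUc n)) (pvUc n)) := by
  simp [pvCanon, List.range_succ]

theorem pv_mem_canon {f : Char → Nat} {n : Nat} {c : Char} (h : c ∈ pvCanon f n) :
    ∃ i, i < n ∧ (c = pvLc i ∨ c = pvUc i) := by
  simp only [pvCanon, List.mem_flatMap, List.mem_range, List.mem_append] at h
  obtain ⟨i, hi, h | h⟩ := h
  · exact ⟨i, hi, Or.inl (List.eq_of_mem_replicate h)⟩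
  · exact ⟨i, hi, Or.inr (List.eq_of_mem_replicate h)⟩

theorem pv_count_canon (f : Char → Nat) (c : Char) (n : Nat) (hn : n ≤ 26) :
    (pvCanon f n).count c = if ∃ i, i < n ∧ (c = pvLc i ∨ c = pvUc i) then f c else 0 := by
  induction n with
  | zero => simp [pvCanon]
  | succ k ih =>
    have hk : k < 26 := by omega
    rw [pvCanon_succ, List.count_append, List.count_append, ih (by omega),
        List.count_replicate, List.count_replicate]
    by_cases hl : c = pvLc k
    · subst hl
      have hnot : ¬∃ i, i < k ∧ (pvLc k = pvLc i ∨ pvLc k = pvUc i) := by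
        rintro ⟨i, hi, hio | hio⟩ <;> have h := congrArg Char.toNat hio <;>
          rw [pvLc_toNat k hk] at h
        · rw [pvLc_toNat i (by omega)] at h; omega
        · rw [pvUc_toNat i (by omega)] at h; omega
      have hne : pvUc k ≠ pvLc k := fun h => pvLc_ne_pvUc hk hk h.symm
      have hP : ∃ i, i < k + 1 ∧ (pvLc k = pvLc i ∨ pvLc k = pvUc i) :=
        ⟨k, Nat.lt_succ_self k, Or.inl rfl⟩
      rw [if_neg hnot, if_pos hP]
      simp [hne]
    · by_cases hu : c = pvUc k
      · subst hu
        have hnot : ¬∃ i, i < k ∧ (pvUc k = pvLc i ∨ pvUc k = pvUc i) := by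
          rintro ⟨i, hi, hio | hio⟩ <;> have h := congrArg Char.toNat hio <;>
            rw [pvUc_toNat k hk] at h
          · rw [pvLc_toNat i (by omega)] at h; omega
          · rw [pvUc_toNat i (by omega)] at h; omega
        have hne : pvLc k ≠ pvUc k := pvLc_ne_pvUc hk hk
        have hP : ∃ i, i < k + 1 ∧ (pvUc k = pvLc i ∨ pvUc k = pvUc i) :=
          ⟨k, Nat.lt_succ_self k, Or.inr rfl⟩
        rw [if_neg hnot, if_pos hP]
        simp [hne]
      · have hiff : (∃ i, i < k + 1 ∧ (c = pvLc i ∨ c = pvUc i)) ↔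
            ∃ i, i < k ∧ (c = pvLc i ∨ c = pvUc i) := by
          constructor
          · rintro ⟨i, hi, hio⟩
            rcases Nat.lt_succ_iff_lt_or_eq.mp hi with h' | rfl
            · exact ⟨i, h', hio⟩
            · rcases hio with h | h
              · exact absurd h hl
              · exact absurd h hu
          · rintro ⟨i, hi, hio⟩; exact ⟨i, by omega, hio⟩
        simp only [hiff]
        have h1 : (pvLc k == c) = false := beq_eq_false_iff_ne.mpr (fun h => hl h.symm)
        have h2 : (pvUc k == c) = false := beq_eq_false_iff_ne.mpr (fun h => hu h.symm)
        rw [h1, h2]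
        simp

-- every kept character names a block
theorem pv_letter_block {c : Char} (hc : pvLetterB c = true) :
    ∃ i, i < 26 ∧ (c = pvLc i ∨ c = pvUc i) := by
  simp only [pvLetterB, Bool.or_eq_true, Bool.and_eq_true, decide_eq_true_eq] at hc
  have hb : (97 ≤ c.toNat ∧ c.toNat ≤ 122) ∨ (65 ≤ c.toNat ∧ c.toNat ≤ 90) := by
    rcases hc with ⟨h1, h2⟩ | ⟨h1, h2⟩
    · left
      constructor <;> simpa [Char.le_def, UInt32.le_iff_toNat_le] using ‹_›
    · right
      constructor <;> simpa [Char.le_def, UInt32.le_iff_toNat_le] using ‹_›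
  rcases hb with ⟨h1, h2⟩ | ⟨h1, h2⟩
  · refine ⟨c.toNat - 97, by omega, Or.inl ?_⟩
    apply pv_toNat_inj
    rw [pvLc_toNat _ (by omega)]; omega
  · refine ⟨c.toNat - 65, by omega, Or.inr ?_⟩
    apply pv_toNat_inj
    rw [pvUc_toNat _ (by omega)]; omega

-- the canonical list built from the kept counts is a permutation of the kept letters
theorem pv_canon_perm (xs : List Char) :
    (pvCanon (fun c => (xs.filter pvLetterB).count c) 26).Perm (xs.filter pvLetterB) := by
  rw [List.perm_iff_count]
  intro c
  rw [pv_count_canon _ _ 26 (le_refl 26)]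
  by_cases h : ∃ i, i < 26 ∧ (c = pvLc i ∨ c = pvUc i)
  · rw [if_pos h]
  · rw [if_neg h]
    symm
    rw [List.count_eq_zero]
    intro hmem
    exact h (pv_letter_block (List.of_mem_filter hmem))

theorem pv_keyB_inj : Function.Injective pvKeyB := by
  intro a b h
  unfold pvKeyB at h
  apply pv_toNat_inj
  by_cases ha : 'A' ≤ a ∧ a ≤ 'Z' <;> by_cases hb : 'A' ≤ b ∧ b ≤ 'Z'
  · rw [if_pos ha, if_pos ha, if_pos hb, if_pos hb] at h; omega
  · rw [if_pos ha, if_pos ha, if_neg hb, if_neg hb] at h; omega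
  · rw [if_neg ha, if_neg ha, if_pos hb, if_pos hb] at h; omega
  · rw [if_neg ha, if_neg ha, if_neg hb, if_neg hb] at h; omega

theorem pv_key_lc (i : Nat) (h : i < 26) : pvKeyB (pvLc i) = 194 + 2 * (i:Int) := by
  interval_cases i <;> decide

theorem pv_key_uc (i : Nat) (h : i < 26) : pvKeyB (pvUc i) = 195 + 2 * (i:Int) := by
  interval_cases i <;> decide

-- the canonical list is sorted under B's key
theorem pv_canon_pairwise (f : Char → Nat) (n : Nat) (hn : n ≤ 26) :
    (pvCanon f n).Pairwise (fun a b => pvKeyB a ≤ pvKeyB b) := by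
  induction n with
  | zero => simp [pvCanon]
  | succ k ih =>
    have hk : k < 26 := by omega
    rw [pvCanon_succ, List.pairwise_append]
    refine ⟨ih (by omega), ?_, ?_⟩
    · rw [List.pairwise_append]
      refine ⟨List.pairwise_replicate.mpr (Or.inr (le_refl _)),
              List.pairwise_replicate.mpr (Or.inr (le_refl _)), ?_⟩
      intro a ha b hb
      rw [List.eq_of_mem_replicate ha, List.eq_of_mem_replicate hb,
          pv_key_lc k hk, pv_key_uc k hk]
      omega
    · intro a ha b hb
      obtain ⟨i, hi, hio⟩ := pv_mem_canon ha
      have hka : pvKeyB a ≤ 195 + 2 * (i:Int) := by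
        rcases hio with rfl | rfl
        · rw [pv_key_lc i (by omega)]; omega
        · rw [pv_key_uc i (by omega)]
      have hkb : 194 + 2 * (k:Int) ≤ pvKeyB b := by
        rcases List.mem_append.mp hb with hb | hb
        · rw [List.eq_of_mem_replicate hb, pv_key_lc k hk]
        · rw [List.eq_of_mem_replicate hb, pv_key_uc k hk]; omega
      have : (i:Int) < (k:Int) := by exact_mod_cast hi
      omega

-- B's output is the canonical list with counts taken among the kept letters
theorem pv_B_canon (s : String) :
    (alphabetical_alt s).toList
      = pvCanon (fun c => (s.toList.filter pvLetterB).count c) 26 := by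
  simp only [alphabetical_alt]
  rw [String.toList_ofList]
  exact PySem.List.eq_of_perm_of_pairwise_le_of_injective pvKeyB pv_keyB_inj
    ((PySem.List.sorted_perm _ _ _).trans (pv_canon_perm s.toList).symm)
    (PySem.List.sorted_pairwise _ _)
    (pv_canon_pairwise _ 26 (le_refl 26))

theorem pvLetterB_lc (i : Nat) (h : i < 26) : pvLetterB (pvLc i) = true := by
  interval_cases i <;> decide

theorem pvLetterB_uc (i : Nat) (h : i < 26) : pvLetterB (pvUc i) = true := by
  interval_cases i <;> decide

-- ===== VERDICT (by name: the statement is the Claim_ definition above) =====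
theorem alphabetical_spec : Claim_equal_alphabetical := by
  intro s _
  unfold Spec_alphabetical
  have hA := pv_A_canon s
  have hB := pv_B_canon s
  have hcanon : pvCanon (fun c => s.toList.count c) 26
      = pvCanon (fun c => (s.toList.filter pvLetterB).count c) 26 := by
    apply List.flatMap_congr
    intro i hi
    have hi' : i < 26 := List.mem_range.mp hi
    simp only []
    rw [List.count_filter (pvLetterB_lc i hi'), List.count_filter (pvLetterB_uc i hi')]
  have : (alphabetical s).toList = (alphabetical_alt s).toList := by
    rw [hA, hB, hcanon]
  exact String.toList_inj.mp this
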